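-- pv_equiv track=rewrite | github.com/nicklasorte/spectrum-systems | spectrum_systems/governance/authority_shape_preflight.py | _identifier_matches_term
-- ===== SOURCE A (Python) =====
-- def _identifier_subtokens(identifier: str) -> set[str]:
--     """Return lowercase subtokens of an identifier split by underscores."""
--     return {token for token in identifier.lower().split("_") if token}
--
-- def _identifier_matches_term(identifier: str, term: str) -> bool:
--     """Match a term against an identifier.
--
--     Multi-token terms (containing ``_``) match as a contiguous substring on the
--     underscore-token boundary. Single-token terms match any underscore-separated
--     subtoken. This catches ``promotion_decision`` for the term ``decision`` and
--     for the term ``promotion`` while ignoring incidental substrings like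
--     ``promoter`` or ``decisionless``.
--     """
--     lowered_id = identifier.lower()
--     lowered_term = term.lower()
--     if not lowered_term:
--         return False
--     if "_" in lowered_term:
--         tokens = lowered_id.split("_")
--         term_tokens = lowered_term.split("_")
--         if not term_tokens:
--             return False
--         for start in range(0, len(tokens) - len(term_tokens) + 1):
--             if tokens[start : start + len(term_tokens)] == term_tokens:
--                 return True
--         return False
--     return lowered_term in _identifier_subtokens(lowered_id)
-- ===== SOURCE B (Python) =====
-- def _identifier_matches_term(identifier: str, term: str) -> bool:
--     """Match a term against an underscore-tokenized identifier.
--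
--     A contiguous underscore-token match of term inside identifier is the same
--     thing as the underscore-padded term occurring as a substring of the
--     underscore-padded identifier, so one substring test covers both the
--     single-token and the multi-token case.
--     """
--     lowered_term = term.lower()
--     if not lowered_term:
--         return False
--     return f"_{lowered_term}_" in f"_{identifier.lower()}_"
-- ===== Notes on version B (the rewrite author's own statement) =====
-- stated objective: simpler
-- what changed: Replaces the helper subtoken set and the explicit sliding-window loop over token slices with a single sentinel-padded substring test: '_term_' in '_identifier_', which covers the single-token and multi-token cases uniformly.
import Mathlib
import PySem

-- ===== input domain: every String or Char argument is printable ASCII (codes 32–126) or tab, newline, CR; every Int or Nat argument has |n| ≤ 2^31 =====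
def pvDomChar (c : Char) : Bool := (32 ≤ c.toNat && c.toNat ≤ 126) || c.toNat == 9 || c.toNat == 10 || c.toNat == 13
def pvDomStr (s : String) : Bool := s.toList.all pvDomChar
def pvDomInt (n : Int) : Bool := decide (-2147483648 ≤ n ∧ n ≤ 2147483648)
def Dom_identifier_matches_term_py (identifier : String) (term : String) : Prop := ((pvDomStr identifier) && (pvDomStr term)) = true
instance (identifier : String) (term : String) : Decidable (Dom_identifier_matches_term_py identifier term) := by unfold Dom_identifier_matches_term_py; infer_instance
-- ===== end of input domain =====

-- B replaces A's subtoken set and sliding-window token-slice loop with one sentinel-padded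
-- substring test ('_term_' in '_identifier_'); objective: simpler, same behaviour.

-- ===== PORT A =====
-- helper: _identifier_subtokens
def identifier_subtokens (identifier : List Char) : PySem.Set (List Char) :=
  PySem.Set.ofList
    ((PySem.Chars.splitOn (PySem.Chars.lower identifier) ['_']).filter (fun token => !token.isEmpty))

def identifier_matches_term_py (identifier : String) (term : String) : Bool :=
  let lowered_id := PySem.Chars.lower identifier.toList
  let lowered_term := PySem.Chars.lower term.toList
  if lowered_term = [] then false
  else if PySem.Chars.isIn ['_'] lowered_term then
    let tokens := PySem.Chars.splitOn lowered_id ['_']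
    let term_tokens := PySem.Chars.splitOn lowered_term ['_']
    if term_tokens = [] then false
    else
      (PySem.List.pyRange 0 ((tokens.length : Int) - (term_tokens.length : Int) + 1)).any
        (fun start =>
          PySem.List.slice tokens (some start) (some (start + (term_tokens.length : Int))) == term_tokens)
  else PySem.Set.contains (identifier_subtokens lowered_id) lowered_term

-- ===== PORT B =====
def identifier_matches_term_py_alt (identifier : String) (term : String) : Bool :=
  let lowered_term := PySem.Chars.lower term.toList
  if lowered_term = [] then false
  else
    PySem.Chars.isIn ('_' :: lowered_term ++ ['_'])
      ('_' :: PySem.Chars.lower identifier.toList ++ ['_'])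

-- ===== PRECONDITION & SPEC =====
-- A is total: no Pre_ needed.
def Spec_identifier_matches_term_py (identifier : String) (term : String) (out : Bool) : Prop := out = identifier_matches_term_py_alt identifier term
instance (identifier : String) (term : String) (out : Bool) : Decidable (Spec_identifier_matches_term_py identifier term out) := by unfold Spec_identifier_matches_term_py; infer_instance

-- ===== CLAIM (what is proved, stated in full; the proofs are below) =====
def Claim_equal_identifier_matches_term_py : Prop := ∀ (identifier : String) (term : String), Dom_identifier_matches_term_py identifier term → Spec_identifier_matches_term_py identifier term (identifier_matches_term_py identifier term)

-- ===== LEMMAS AND PROOFS =====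

theorem lowerChar_idem (c : Char) : PySem.Chars.lowerChar (PySem.Chars.lowerChar c) = PySem.Chars.lowerChar c := by
  unfold PySem.Chars.lowerChar PySem.Chars.isupper
  split
  · next h =>
    simp only [Bool.and_eq_true, decide_eq_true_eq, Char.le_def, UInt32.le_iff_toNat_le] at h
    have hA : ('A' : Char).val.toNat = 65 := by decide
    have hZ : ('Z' : Char).val.toNat = 90 := by decide
    have hval : (c.val.toNat + 32).isValidChar := Or.inl (by omega)
    have hv : (Char.ofNat (c.val.toNat + 32)).toNat = c.val.toNat + 32 := by
      rw [Char.toNat_ofNat, if_pos hval]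
    have hv' : (Char.ofNat (c.toNat + 32)).val.toNat = c.val.toNat + 32 := hv
    rw [if_neg]
    simp only [Bool.and_eq_true, decide_eq_true_eq, Char.le_def, UInt32.le_iff_toNat_le, not_and]
    intro _
    omega
  · simp


theorem lower_idem (s : List Char) : PySem.Chars.lower (PySem.Chars.lower s) = PySem.Chars.lower s := by
  simp [PySem.Chars.lower, Function.comp_def, lowerChar_idem]


theorem go_eq (fuel : Nat) (l cur : List Char) (acc : List (List Char)) (h : l.length < fuel) :
    PySem.Chars.splitOn.go ['_'] fuel l cur acc
      = acc.reverse ++ (l.splitOn '_').modifyHead (cur.reverse ++ ·) := by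
  induction fuel generalizing l cur acc with
  | zero => omega
  | succ fuel ih =>
    cases l with
    | nil =>
      simp [PySem.Chars.splitOn.go, List.splitOn, List.splitOnP_nil]
    | cons c rest =>
      rw [PySem.Chars.splitOn.go]
      by_cases hc : c = '_'
      · subst hc
        have hpre : (['_'] : List Char).isPrefixOf ('_' :: rest) = true := by simp [List.isPrefixOf]
        rw [if_pos hpre]
        rw [ih _ _ _ (by simp at h ⊢; omega)]
        simp only [List.splitOn, List.splitOnP_cons, beq_self_eq_true, if_pos, List.reverse_cons,
          List.append_assoc]
        cases hsp : List.splitOnP (fun x => x == '_') rest with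
        | nil => exact absurd hsp (List.splitOnP_ne_nil _ _)
        | cons a t => simp [List.modifyHead, hsp]
      · have hpre : ¬ ((['_'] : List Char).isPrefixOf (c :: rest) = true) := by
          simp only [List.isPrefixOf, Bool.and_eq_true, beq_iff_eq, not_and]
          exact fun h => absurd h.symm hc
        rw [if_neg hpre]
        rw [ih _ _ _ (by simp at h ⊢; omega)]
        obtain ⟨h0, t0, he⟩ := List.exists_cons_of_ne_nil (List.splitOnP_ne_nil (· == '_') rest)
        simp [List.splitOn, List.splitOnP_cons, hc, he]


theorem chars_splitOn_eq (s : List Char) : PySem.Chars.splitOn s ['_'] = s.splitOn '_' := by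
  have := go_eq (s.length + 1) s [] [] (by omega)
  obtain ⟨h0, t0, he⟩ := List.exists_cons_of_ne_nil (List.splitOnP_ne_nil (· == '_') s)
  simp only [PySem.Chars.splitOn] at *
  rw [this]
  simp [List.splitOn, he]


theorem splitOn_append (x y : List Char) :
    (x ++ '_' :: y).splitOn '_' = x.splitOn '_' ++ y.splitOn '_' := by
  induction x with
  | nil => simp [List.splitOn, List.splitOnP_cons]
  | cons c x ih =>
    by_cases hc : c = '_'
    · subst hc; simp [List.splitOn, List.splitOnP_cons] at ih ⊢; rw [ih]
    · obtain ⟨h0, t0, he⟩ := List.exists_cons_of_ne_nil (List.splitOnP_ne_nil (· == '_') (x ++ '_' :: y))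
      obtain ⟨h1, t1, he1⟩ := List.exists_cons_of_ne_nil (List.splitOnP_ne_nil (· == '_') x)
      simp [List.splitOn, List.splitOnP_cons, hc, he, he1] at ih ⊢
      exact ih


theorem splitOn_ne_nil (x : List Char) : x.splitOn '_' ≠ [] := by
  simpa [List.splitOn] using List.splitOnP_ne_nil (· == '_') x


theorem inter_cons₂ (a : List Char) (l : List (List Char)) (h : l ≠ []) :
    ['_'].intercalate (a :: l) = a ++ '_' :: ['_'].intercalate l := by
  cases l with
  | nil => exact absurd rfl h
  | cons b l => simp [List.intercalate, List.intersperse]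


theorem intercalate_split (P M : List (List Char)) (hP : P ≠ []) (hM : M ≠ []) :
    ['_'].intercalate (P ++ M) = ['_'].intercalate P ++ '_' :: ['_'].intercalate M := by
  induction P with
  | nil => exact absurd rfl hP
  | cons p P ih =>
    cases P with
    | nil =>
      rw [List.singleton_append, inter_cons₂ p M hM]
      simp [List.intercalate, List.intersperse]
    | cons q P =>
      rw [List.cons_append, inter_cons₂ p (q :: P ++ M) (by simp),
        inter_cons₂ p (q :: P) (by simp), ih (by simp)]
      simp


theorem singleton_infix (a : List Char) (l : List (List Char)) : [a] <:+: l ↔ a ∈ l := by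
  constructor
  · rintro ⟨s, t, rfl⟩; simp
  · intro h
    obtain ⟨s, t, rfl⟩ := List.mem_iff_append.mp h
    exact ⟨s, t, by simp⟩


theorem no_underscore_of_not_isIn (u : List Char) (h : PySem.Chars.isIn ['_'] u = false) :
    '_' ∉ u := by
  intro hm
  have h2 : PySem.Chars.isIn ['_'] u = true := by
    rw [PySem.Chars.isIn_iff_infix]
    obtain ⟨s, t, rfl⟩ := List.mem_iff_append.mp hm
    exact ⟨s, t, by simp⟩
  simp [h2] at h


theorem append_singleton_inj {x y : List Char} {c d : Char} (h : x ++ [c] = y ++ [d]) :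
    x = y ∧ c = d := by
  have h1 := congrArg List.dropLast h
  have h2 := congrArg List.getLast? h
  simp at h1 h2
  exact ⟨h1, h2⟩

theorem pad_mp (s u : List Char) (h : ('_' :: u ++ ['_']) <:+: ('_' :: s ++ ['_'])) :
    (u.splitOn '_') <:+: (s.splitOn '_') := by
  obtain ⟨a, b, hab⟩ := h
  rcases a with _ | ⟨c, a⟩
  · have hab2 : u ++ '_' :: b = s ++ ['_'] := by
      simpa using hab
    rcases List.eq_nil_or_concat b with rfl | ⟨b', e, rfl⟩
    · have : u = s := by simpa using hab2
      subst this
      exact ⟨[], [], by simp⟩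
    · have h6 : (u ++ '_' :: b') ++ [e] = s ++ ['_'] := by
        rw [List.append_assoc, List.cons_append]
        simpa using hab2
      have hs : s = u ++ '_' :: b' := ((append_singleton_inj h6).1).symm
      subst hs
      exact ⟨[], b'.splitOn '_', by simp [splitOn_append]⟩
  · have hc : '_' = c := by
      simpa using (congrArg List.head? hab).symm
    subst hc
    have hab2 : a ++ '_' :: u ++ '_' :: b = s ++ ['_'] := by
      simpa using hab
    rcases List.eq_nil_or_concat b with rfl | ⟨b', e, rfl⟩
    · have h6 : (a ++ '_' :: u) ++ ['_'] = s ++ ['_'] := by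
        rw [List.append_assoc, List.cons_append]
        simpa using hab2
      have hs : s = a ++ '_' :: u := ((append_singleton_inj h6).1).symm
      subst hs
      exact ⟨a.splitOn '_', [], by simp [splitOn_append]⟩
    · have h6 : (a ++ '_' :: (u ++ '_' :: b')) ++ [e] = s ++ ['_'] := by
        rw [List.append_assoc, List.cons_append, List.append_assoc, List.cons_append]
        simpa using hab2
      have hs : s = a ++ '_' :: (u ++ '_' :: b') := ((append_singleton_inj h6).1).symm
      subst hs
      exact ⟨a.splitOn '_', b'.splitOn '_', by simp [splitOn_append]⟩

theorem pad_iff (s u : List Char) :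
    ('_' :: u ++ ['_']) <:+: ('_' :: s ++ ['_']) ↔ (u.splitOn '_') <:+: (s.splitOn '_') := by
  constructor
  · exact pad_mp s u
  · rintro ⟨P, Q, hPQ⟩
    have hs : ['_'].intercalate (P ++ u.splitOn '_' ++ Q) = s := by
      rw [hPQ, List.intercalate_splitOn]
    have hu : u = ['_'].intercalate (u.splitOn '_') := (List.intercalate_splitOn u '_').symm
    rcases eq_or_ne P [] with rfl | hP <;> rcases eq_or_ne Q [] with rfl | hQ
    · have h2 : u = s := by rw [hu]; simpa using hs
      exact ⟨[], [], by rw [h2]; simp⟩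
    · have h2 : s = u ++ '_' :: ['_'].intercalate Q := by
        rw [← hs]
        simp only [List.nil_append]
        rw [intercalate_split (u.splitOn '_') Q (splitOn_ne_nil u) hQ, ← hu]
      exact ⟨[], ['_'].intercalate Q ++ ['_'], by rw [h2]; simp⟩
    · have h2 : s = ['_'].intercalate P ++ '_' :: u := by
        rw [← hs]
        simp only [List.append_nil]
        rw [intercalate_split P (u.splitOn '_') hP (splitOn_ne_nil u), ← hu]
      exact ⟨'_' :: ['_'].intercalate P, [], by rw [h2]; simp⟩
    · have h2 : s = ['_'].intercalate P ++ '_' :: (u ++ '_' :: ['_'].intercalate Q) := by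
        rw [← hs, List.append_assoc,
          intercalate_split P (u.splitOn '_' ++ Q) hP (by simp [splitOn_ne_nil u]),
          intercalate_split (u.splitOn '_') Q (splitOn_ne_nil u) hQ, ← hu]
      exact ⟨'_' :: ['_'].intercalate P, ['_'].intercalate Q ++ ['_'], by rw [h2]; simp⟩

theorem any_slice_iff (S U : List (List Char)) :
    ((PySem.List.pyRange 0 ((S.length : Int) - (U.length : Int) + 1)).any
      (fun start => PySem.List.slice S (some start) (some (start + (U.length : Int))) == U)) = true
      ↔ U <:+: S := by
  rw [List.any_eq_true]
  constructor
  · rintro ⟨i, hi, hp⟩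
    obtain ⟨h0, -⟩ := PySem.List.mem_pyRange_one.mp hi
    obtain ⟨n, rfl⟩ := Int.eq_ofNat_of_zero_le h0
    have : PySem.List.slice S (some (n : Int)) (some ((n : Int) + (U.length : Int))) = U := by
      simpa using hp
    rw [show ((n : Int) + (U.length : Int)) = ((n + U.length : Nat) : Int) by push_cast; ring,
      PySem.List.slice_natCast] at this
    have hU : (S.drop n).take U.length = U := by
      simpa [Nat.add_sub_cancel_left] using this
    refine ⟨S.take n, (S.drop n).drop U.length, ?_⟩
    have h2 : S.take n ++ ((S.drop n).take U.length ++ (S.drop n).drop U.length) = S := by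
      rw [List.take_append_drop, List.take_append_drop]
    rw [hU] at h2
    simpa using h2
  · rintro ⟨P, Q, rfl⟩
    refine ⟨(P.length : Int), ?_, ?_⟩
    · rw [PySem.List.mem_pyRange_one]
      constructor
      · positivity
      · simp only [List.length_append]
        push_cast
        omega
    · rw [show ((P.length : Int) + (U.length : Int)) = ((P.length + U.length : Nat) : Int) by
        push_cast; ring, PySem.List.slice_natCast]
      have h1 : List.drop P.length (P ++ U ++ Q) = U ++ Q := by
        rw [List.append_assoc, List.drop_left]
      rw [h1, Nat.add_sub_cancel_left, List.take_left]
      simp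


theorem ports_eq (identifier term : String) :
    identifier_matches_term_py identifier term = identifier_matches_term_py_alt identifier term := by
  simp only [identifier_matches_term_py, identifier_matches_term_py_alt]
  by_cases hu : PySem.Chars.lower term.toList = []
  · simp [hu]
  · rw [if_neg hu, if_neg hu]
    by_cases hund : PySem.Chars.isIn ['_'] (PySem.Chars.lower term.toList) = true
    · rw [if_pos hund, if_neg (by rw [chars_splitOn_eq]; exact splitOn_ne_nil _)]
      rw [Bool.eq_iff_iff]
      rw [chars_splitOn_eq, chars_splitOn_eq, any_slice_iff,
        PySem.Chars.isIn_iff_infix, pad_iff]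
    · rw [if_neg hund]
      have hnu : '_' ∉ PySem.Chars.lower term.toList :=
        no_underscore_of_not_isIn _ (by simpa using hund)
      rw [Bool.eq_iff_iff, PySem.Chars.isIn_iff_infix, pad_iff]
      have hsingle : (PySem.Chars.lower term.toList).splitOn '_' = [PySem.Chars.lower term.toList] := by
        apply List.splitOnP_eq_single
        intro x hx
        simp only [beq_iff_eq]
        exact fun h => hnu (h ▸ hx)
      rw [hsingle, singleton_infix]
      unfold identifier_subtokens
      rw [lower_idem, chars_splitOn_eq]
      rw [show PySem.Set.contains (PySem.Set.ofList (((PySem.Chars.lower identifier.toList).splitOn '_').filter (fun token => !token.isEmpty))) (PySem.Chars.lower term.toList) = true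
          ↔ PySem.Chars.lower term.toList ∈ PySem.Set.ofList (((PySem.Chars.lower identifier.toList).splitOn '_').filter (fun token => !token.isEmpty)) from by
        simp [PySem.Set.contains]]
      rw [PySem.Set.mem_ofList, List.mem_filter]
      constructor
      · exact fun h => h.1
      · intro h
        exact ⟨h, by simpa [List.isEmpty_iff] using hu⟩

-- ===== VERDICT (by name: the statement is the Claim_ definition above) =====
theorem identifier_matches_term_py_spec : Claim_equal_identifier_matches_term_py := by
  intro identifier term _
  unfold Spec_identifier_matches_term_py
  exact ports_eq identifier term
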